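-- pv_equiv track=rewrite | github.com/Vorlaak/Advent-of-Code | 2025/09-12/09_12(2).py | process_points
-- ===== SOURCE A (Python) =====
-- def get_area(x1, y1, x2, y2):
--     x = abs(x1 - x2) + 1
--     y = abs(y1 - y2) + 1
--     return x * y
--
-- def process_points(points):
--     n = len(points)
--     edges = []
--     sizes = []
--     for i in range(n):
--         edges.append(sorted((points[i], points[i - 1])))
--         for j in range(i + 1, n):
--             c1, c2 = sorted((points[i], points[j]))
--             sizes.append((get_area(*c1, *c2), c1, c2))
--
--     edges.sort(reverse=True, key=lambda e: get_area(*e[0], *e[1]))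
--     sizes.sort(reverse=True)
--
--     for size, (x1, y1), (x2, y2) in sizes:
--         y1, y2 = sorted((y1, y2))
--         if not any(
--             (x4 > x1 and x3 < x2 and y4 > y1 and y3 < y2)
--             for (x3, y3), (x4, y4) in edges
--         ):
--             return size
-- ===== SOURCE B (Python) =====
-- def get_area(x1, y1, x2, y2):
--     x = abs(x1 - x2) + 1
--     y = abs(y1 - y2) + 1
--     return x * y
--
--
-- def process_points(points):
--     n = len(points)
--     # polygon edges as sorted endpoint pairs, via zip with the rotated list
--     edges = [sorted(pair) for pair in zip(points, points[-1:] + points[:-1])]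
--
--     def clear(c1, c2):
--         x1, x2 = c1[0], c2[0]
--         y1, y2 = sorted((c1[1], c2[1]))
--         return not any(
--             x4 > x1 and x3 < x2 and y4 > y1 and y3 < y2
--             for (x3, y3), (x4, y4) in edges
--         )
--
--     # single pass: running maximum over admissible pairs (no candidate sorting);
--     # the clear() scan runs only when the pair would improve the maximum
--     best = None
--     for i in range(n):
--         p = points[i]
--         for j in range(i + 1, n):
--             c1, c2 = sorted((p, points[j]))
--             size = get_area(*c1, *c2)
--             if (best is None or size > best) and clear(c1, c2):
--                 best = size
--     return best
-- ===== Notes on version B (the rewrite author's own statement) =====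
-- stated objective: alternative
-- what changed: B drops A's build-and-sort of the O(n^2) candidate list (and the edge sort) and instead keeps a running maximum in a single pass over the pairs, scanning the edges only when a pair would improve the current maximum; edges are built by zipping the point list with its rotation.
import Mathlib
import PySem

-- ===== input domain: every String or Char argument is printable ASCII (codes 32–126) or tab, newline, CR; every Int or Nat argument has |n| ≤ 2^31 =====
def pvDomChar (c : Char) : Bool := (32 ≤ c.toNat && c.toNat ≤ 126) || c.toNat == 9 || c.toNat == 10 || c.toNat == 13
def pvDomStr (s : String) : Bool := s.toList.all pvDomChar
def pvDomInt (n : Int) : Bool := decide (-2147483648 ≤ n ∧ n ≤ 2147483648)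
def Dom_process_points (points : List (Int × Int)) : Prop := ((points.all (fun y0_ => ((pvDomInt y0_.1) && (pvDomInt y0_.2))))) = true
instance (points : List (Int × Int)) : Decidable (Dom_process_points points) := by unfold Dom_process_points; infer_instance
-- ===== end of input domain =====

-- B replaces A's build-all-candidates + sort-descending + first-clear scan by a single
-- running-maximum pass over the pairs (no candidate list, no sorting); objective: alternative.

-- shared helpers: both Pythons contain get_area, sorted of a 2-element tuple, and the identical
-- edge-overlap generator expression
abbrev pvTrip := Int × (Int × Int) × (Int × Int)

def pvArea (x1 y1 x2 y2 : Int) : Int := (|x1 - x2| + 1) * (|y1 - y2| + 1)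

-- Python '<' on int pairs (lexicographic)
def pvPairLt (a b : Int × Int) : Bool := a.1 < b.1 || (a.1 == b.1 && a.2 < b.2)

-- sorted((p, q)) for a 2-tuple: swap iff q < p
def pvSort2 (p q : Int × Int) : (Int × Int) × (Int × Int) := if pvPairLt q p then (q, p) else (p, q)

-- Python '<=' on the (size, c1, c2) triples (lexicographic)
def pvTripLe (a b : pvTrip) : Bool :=
  a.1 < b.1 || (a.1 == b.1 &&
    (pvPairLt a.2.1 b.2.1 || (a.2.1 == b.2.1 &&
      (pvPairLt a.2.2 b.2.2 || a.2.2 == b.2.2))))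

-- the 'any(...)' generator over edges, with y1, y2 = sorted((y1, y2))
def pvBlocked (edges : List ((Int × Int) × (Int × Int))) (c1 c2 : Int × Int) : Bool :=
  let x1 := c1.1
  let x2 := c2.1
  let y1 := min c1.2 c2.2
  let y2 := max c1.2 c2.2
  edges.any (fun e => decide (x1 < e.2.1) && decide (e.1.1 < x2) && decide (y1 < e.2.2) && decide (e.1.2 < y2))

-- ===== PORT A =====
-- A's final loop: return the first size whose rectangle no edge overlaps
def pvScan (edges : List ((Int × Int) × (Int × Int))) : List pvTrip → Option Int
  | [] => none
  | t :: rest => if !pvBlocked edges t.2.1 t.2.2 then some t.1 else pvScan edges rest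

def process_points (points : List (Int × Int)) : Option Int :=
  let n : Int := PySem.List.len points
  let st := (PySem.List.pyRange 0 n 1).foldl
    (fun (s : List ((Int × Int) × (Int × Int)) × List pvTrip) i =>
      (s.1 ++ [pvSort2 (PySem.List.pyGetD points i (0, 0)) (PySem.List.pyGetD points (i - 1) (0, 0))],
       (PySem.List.pyRange (i + 1) n 1).foldl
         (fun acc j =>
           let c := pvSort2 (PySem.List.pyGetD points i (0, 0)) (PySem.List.pyGetD points j (0, 0))
           acc ++ [(pvArea c.1.1 c.1.2 c.2.1 c.2.2, c.1, c.2)]) s.2))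
    ([], [])
  let edges := PySem.List.sorted st.1 (fun e => pvArea e.1.1 e.1.2 e.2.1 e.2.2) true
  -- sizes.sort(reverse=True): descending full-tuple sort; ties are equal triples, so the stable
  -- Python sort and this insertion sort produce the same list
  let sizes := List.insertionSort (fun a b => pvTripLe b a = true) st.2
  pvScan edges sizes

-- ===== PORT B =====
def process_points_alt (points : List (Int × Int)) : Option Int :=
  let n : Int := PySem.List.len points
  -- edges = [sorted(pair) for pair in zip(points, points[-1:] + points[:-1])]
  let edges := (points.zip (PySem.List.slice points (some (-1)) none ++ PySem.List.slice points none (some (-1)))).map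
    (fun pq => pvSort2 pq.1 pq.2)
  (PySem.List.pyRange 0 n 1).foldl
    (fun best i =>
      let p := PySem.List.pyGetD points i (0, 0)
      (PySem.List.pyRange (i + 1) n 1).foldl
        (fun best j =>
          let c := pvSort2 p (PySem.List.pyGetD points j (0, 0))
          let size := pvArea c.1.1 c.1.2 c.2.1 c.2.2
          if (match best with | none => true | some m => decide (m < size)) && !pvBlocked edges c.1 c.2
          then some size else best)
        best)
    none

-- ===== PRECONDITION & SPEC =====
def Spec_process_points (points : List (Int × Int)) (out : Option Int) : Prop := out = process_points_alt points
instance (points : List (Int × Int)) (out : Option Int) : Decidable (Spec_process_points points out) := by unfold Spec_process_points; infer_instance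

-- ===== CLAIM (what is proved, stated in full; the proofs are below) =====
def Claim_equal_process_points : Prop := ∀ (points : List (Int × Int)), Dom_process_points points → Spec_process_points points (process_points points)

-- ===== LEMMAS AND PROOFS =====

-- the raw edge list, as A builds it
def pvEdgeRaw (points : List (Int × Int)) : List ((Int × Int) × (Int × Int)) :=
  (PySem.List.pyRange 0 (PySem.List.len points) 1).map
    (fun i => pvSort2 (PySem.List.pyGetD points i (0, 0)) (PySem.List.pyGetD points (i - 1) (0, 0)))

-- the candidate triples, in generation order (i, then j > i)
def pvCands (points : List (Int × Int)) : List pvTrip :=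
  (PySem.List.pyRange 0 (PySem.List.len points) 1).flatMap
    (fun i => (PySem.List.pyRange (i + 1) (PySem.List.len points) 1).map
      (fun j =>
        let c := pvSort2 (PySem.List.pyGetD points i (0, 0)) (PySem.List.pyGetD points j (0, 0))
        (pvArea c.1.1 c.1.2 c.2.1 c.2.2, c.1, c.2)))

-- B's loop step on a candidate triple
def pvBStep (edges : List ((Int × Int) × (Int × Int))) (best : Option Int) (t : pvTrip) : Option Int :=
  if (match best with | none => true | some m => decide (m < t.1)) && !pvBlocked edges t.2.1 t.2.2
  then some t.1 else best

-- the running-maximum step the proofs work with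
def pvMaxStep (edges : List ((Int × Int) × (Int × Int))) (best : Option Int) (t : pvTrip) : Option Int :=
  if !pvBlocked edges t.2.1 t.2.2
  then some (match best with | none => t.1 | some m => max m t.1) else best

lemma pvBStep_eq_maxStep (edges : List ((Int × Int) × (Int × Int))) (b : Option Int) (t : pvTrip) :
    pvBStep edges b t = pvMaxStep edges b t := by
  unfold pvBStep pvMaxStep
  cases b with
  | none => cases h : pvBlocked edges t.2.1 t.2.2 <;> simp [h]
  | some m =>
    cases h : pvBlocked edges t.2.1 t.2.2
    · by_cases hm : m < t.1
      · simp [h, hm, max_eq_right (le_of_lt hm)]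
      · simp [h, hm, max_eq_left (not_lt.mp hm)]
    · simp [h]

lemma pvA_unfold (points : List (Int × Int)) :
    process_points points =
      pvScan (PySem.List.sorted (pvEdgeRaw points) (fun e => pvArea e.1.1 e.1.2 e.2.1 e.2.2) true)
        (List.insertionSort (fun a b => pvTripLe b a = true) (pvCands points)) := by
  simp only [process_points]
  rw [PySem.List.foldl_prod_mk
    (f := fun s i => s ++ [pvSort2 (PySem.List.pyGetD points i (0, 0)) (PySem.List.pyGetD points (i - 1) (0, 0))])
    (g := fun s i => (PySem.List.pyRange (i + 1) (PySem.List.len points) 1).foldl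
      (fun acc j =>
        let c := pvSort2 (PySem.List.pyGetD points i (0, 0)) (PySem.List.pyGetD points j (0, 0))
        acc ++ [(pvArea c.1.1 c.1.2 c.2.1 c.2.2, c.1, c.2)]) s)]
  simp only [PySem.List.foldl_append_singleton_eq_map, PySem.List.foldl_append_eq_flatMap,
    List.nil_append, pvEdgeRaw, pvCands]

lemma pvB_unfold (points : List (Int × Int)) :
    process_points_alt points =
      (pvCands points).foldl
        (pvBStep ((points.zip (PySem.List.slice points (some (-1)) none ++ PySem.List.slice points none (some (-1)))).map
          (fun pq => pvSort2 pq.1 pq.2))) none := by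
  unfold process_points_alt pvCands pvBStep
  rw [List.foldl_flatMap]
  simp only [List.foldl_map]

lemma pvSlice_dropLast (xs : List (Int × Int)) :
    PySem.List.slice xs none (some (-1)) = xs.dropLast := by
  simp [PySem.List.slice, PySem.List.clampIdx]
  split_ifs with h
  · simp [h]
  · have ht : ((xs.length : Int) + -1).toNat = xs.length - 1 := by omega
    rw [ht, ← List.dropLast_eq_take]

lemma pvEdges_eq (points : List (Int × Int)) :
    (points.zip (PySem.List.slice points (some (-1)) none ++ PySem.List.slice points none (some (-1)))).map
      (fun pq => pvSort2 pq.1 pq.2) = pvEdgeRaw points := by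
  rcases hp : points with _ | ⟨x, xs⟩
  · rfl
  · rw [← hp]
    have h : points ≠ [] := by rw [hp]; simp
    have hrot : PySem.List.slice points (some (-1)) none ++ PySem.List.slice points none (some (-1)) =
        points.getLast h :: points.dropLast := by
      rw [PySem.List.slice_some_none, PySem.List.clampIdx_neg_one, List.drop_length_sub_one h,
        pvSlice_dropLast]
      rfl
    rw [hrot]
    apply List.ext_getElem
    · simp [pvEdgeRaw, PySem.List.length_pyRange_one, List.length_zip]
      omega
    · intro i h1 h2
      simp only [List.getElem_map, List.getElem_zip, pvEdgeRaw, PySem.List.getElem_pyRange_one,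
        zero_add]
      have hlen : i < points.length := by
        simp [List.length_zip] at h1
        omega
      have hget1 : PySem.List.pyGetD points (i : Int) (0, 0) = points[i] := by
        rw [PySem.List.pyGetD_natCast]
        exact List.getD_eq_getElem _ _ hlen
      rw [hget1]
      cases i with
      | zero =>
        have he : ((0 : Nat) : Int) - 1 = -1 := by norm_num
        rw [he, PySem.List.pyGetD_neg_one points (0, 0) h]
        rfl
      | succ k =>
        have hk : k < points.length := Nat.lt_of_succ_lt hlen
        have : PySem.List.pyGetD points ((k + 1 : Nat) - 1 : Int) (0, 0) = points[k] := by
          have he : ((k + 1 : Nat) : Int) - 1 = (k : Int) := by push_cast; ring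
          rw [he, PySem.List.pyGetD_natCast]
          exact List.getD_eq_getElem _ _ hk
        rw [this]
        simp [List.getElem_dropLast]

lemma pvScan_congr (e1 e2 : List ((Int × Int) × (Int × Int)))
    (h : ∀ c1 c2, pvBlocked e1 c1 c2 = pvBlocked e2 c1 c2) (l : List pvTrip) :
    pvScan e1 l = pvScan e2 l := by
  induction l with
  | nil => rfl
  | cons t rest ih => simp [pvScan, h, ih]

lemma pvBlocked_sorted (edges : List ((Int × Int) × (Int × Int))) (c1 c2 : Int × Int) :
    pvBlocked (PySem.List.sorted edges (fun e => pvArea e.1.1 e.1.2 e.2.1 e.2.2) true) c1 c2 =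
      pvBlocked edges c1 c2 := by
  unfold pvBlocked
  exact (PySem.List.sorted_perm edges _ true).any_eq

lemma pvTripLe_total (a b : pvTrip) : pvTripLe a b = true ∨ pvTripLe b a = true := by
  obtain ⟨a1, ⟨a2, a3⟩, a4, a5⟩ := a
  obtain ⟨b1, ⟨b2, b3⟩, b4, b5⟩ := b
  simp [pvTripLe, pvPairLt, Prod.ext_iff]
  omega

lemma pvTripLe_trans (a b c : pvTrip) (h1 : pvTripLe a b = true) (h2 : pvTripLe b c = true) :
    pvTripLe a c = true := by
  obtain ⟨a1, ⟨a2, a3⟩, a4, a5⟩ := a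
  obtain ⟨b1, ⟨b2, b3⟩, b4, b5⟩ := b
  obtain ⟨c1, ⟨c2, c3⟩, c4, c5⟩ := c
  simp [pvTripLe, pvPairLt, Prod.ext_iff] at *
  omega

lemma pvFoldl_max_of_le (edges : List ((Int × Int) × (Int × Int))) (m : Int) (l : List pvTrip)
    (h : ∀ u ∈ l, u.1 ≤ m) : l.foldl (pvMaxStep edges) (some m) = some m := by
  induction l with
  | nil => rfl
  | cons t rest ih =>
    have ht : t.1 ≤ m := h t (List.mem_cons_self)
    have : pvMaxStep edges (some m) t = some m := by
      unfold pvMaxStep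
      split
      · simp [max_eq_left ht]
      · rfl
    simp only [List.foldl_cons, this]
    exact ih (fun u hu => h u (List.mem_cons_of_mem _ hu))

lemma pvScan_eq_foldl (edges : List ((Int × Int) × (Int × Int))) (l : List pvTrip)
    (h : l.Pairwise (fun a b => b.1 ≤ a.1)) :
    pvScan edges l = l.foldl (pvMaxStep edges) none := by
  induction l with
  | nil => rfl
  | cons t rest ih =>
    rcases List.pairwise_cons.mp h with ⟨hhead, htail⟩
    by_cases hb : pvBlocked edges t.2.1 t.2.2
    · simp [pvScan, hb, List.foldl_cons, pvMaxStep, ih htail]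
    · simp only [pvScan, hb, Bool.not_false, List.foldl_cons]
      simp only [pvMaxStep, hb, Bool.not_false]
      exact (pvFoldl_max_of_le edges t.1 rest hhead).symm

-- ===== VERDICT (by name: the statement is the Claim_ definition above) =====
theorem process_points_spec : Claim_equal_process_points := by
  intro points _
  unfold Spec_process_points
  rw [pvA_unfold, pvB_unfold, pvEdges_eq]
  rw [pvScan_congr _ (pvEdgeRaw points) (pvBlocked_sorted (pvEdgeRaw points))]
  have hpair : (List.insertionSort (fun a b => pvTripLe b a = true) (pvCands points)).Pairwise
      (fun a b => b.1 ≤ a.1) := by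
    haveI : Std.Total (fun (a b : pvTrip) => pvTripLe b a = true) := ⟨fun a b => pvTripLe_total b a⟩
    haveI : IsTrans pvTrip (fun a b => pvTripLe b a = true) := ⟨fun a b c h1 h2 => pvTripLe_trans c b a h2 h1⟩
    refine (List.pairwise_insertionSort (fun a b => pvTripLe b a = true) (pvCands points)).imp ?_
    intro a b h
    obtain ⟨a1, x⟩ := a; obtain ⟨b1, y⟩ := b
    simp [pvTripLe, pvPairLt] at h
    omega
  rw [pvScan_eq_foldl _ _ hpair]
  haveI : RightCommutative (pvMaxStep (pvEdgeRaw points)) := by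
    constructor
    intro b t1 t2
    unfold pvMaxStep
    cases h1 : pvBlocked (pvEdgeRaw points) t1.2.1 t1.2.2 <;>
      cases h2 : pvBlocked (pvEdgeRaw points) t2.2.1 t2.2.2 <;>
        cases b <;> simp [h2, h1] <;> try omega
  rw [(List.perm_insertionSort (fun a b => pvTripLe b a = true) (pvCands points)).foldl_eq]
  exact (PySem.List.foldl_congr_mem (pvCands points) (pvBStep (pvEdgeRaw points)) (pvMaxStep (pvEdgeRaw points)) none (fun acc x _ => pvBStep_eq_maxStep _ acc x)).symm
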